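-- pv_equiv track=rewrite | github.com/frankyaoxiao/model-diffing | scripts/safety/plot_model_variant_compare.py | aggregate_variant
-- ===== SOURCE A (Python) =====
-- from typing import Dict, List, Tuple
--
-- def aggregate_variant(entries: List[dict]) -> Dict[str, Tuple[int, int]]:
--     """Return mapping variant_type -> (harmful_count, total_count)."""
--     out: Dict[str, Tuple[int, int]] = {
--         "base": (0, 0),
--         "base_plus_distractor": (0, 0),
--     }
--     for e in entries:
--         vt = e.get("variant_type")
--         if vt not in out:
--             continue
--         h, t = out[vt]
--         t += 1
--         if e.get("judgment") == "harmful":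
--             h += 1
--         out[vt] = (h, t)
--     return out
-- ===== SOURCE B (Python) =====
-- from typing import Dict, List, Tuple
--
-- def aggregate_variant(entries: List[dict]) -> Dict[str, Tuple[int, int]]:
--     """Return mapping variant_type -> (harmful_count, total_count)."""
--     return {
--         vt: (
--             sum(1 for e in entries
--                 if e.get("variant_type") == vt and e.get("judgment") == "harmful"),
--             sum(1 for e in entries if e.get("variant_type") == vt),
--         )
--         for vt in ("base", "base_plus_distractor")
--     }
-- ===== Notes on version B (the rewrite author's own statement) =====
-- stated objective: simpler
-- what changed: Replaces the single pass that mutates a dict of (harmful,total) tuples with a per-key dict comprehension: each of the two fixed variant types is counted independently by two sums over the entries.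
import Mathlib
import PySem

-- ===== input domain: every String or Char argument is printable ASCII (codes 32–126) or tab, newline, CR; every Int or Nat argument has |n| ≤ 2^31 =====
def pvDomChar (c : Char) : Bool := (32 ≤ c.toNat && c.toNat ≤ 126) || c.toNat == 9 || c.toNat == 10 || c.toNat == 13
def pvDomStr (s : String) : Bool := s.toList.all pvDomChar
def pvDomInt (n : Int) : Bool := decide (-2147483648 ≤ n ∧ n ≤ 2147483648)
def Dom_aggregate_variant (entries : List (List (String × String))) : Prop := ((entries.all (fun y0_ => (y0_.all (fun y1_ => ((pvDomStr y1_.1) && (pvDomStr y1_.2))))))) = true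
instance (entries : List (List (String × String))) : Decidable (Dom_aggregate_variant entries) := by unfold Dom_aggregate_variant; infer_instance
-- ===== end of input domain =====

-- B replaces A's single dict-mutating pass by independent per-key counting (objective: simpler; return-value equivalence).

-- ===== PORT A =====
-- one entry e is a Python dict str -> str; e.get(k) is first-match lookup
def aggregate_variant (entries : List (List (String × String))) : List (String × Int × Int) :=
  let out : PySem.Dict String (Int × Int) :=
    PySem.Dict.ofList [("base", (0, 0)), ("base_plus_distractor", (0, 0))]
  let out := entries.foldl (fun out e =>
    match (PySem.Dict.mk e).get? "variant_type" with
    | none => out                                   -- vt = None: 'vt not in out', continue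
    | some vt =>
      match out.get? vt with
      | none => out                                 -- 'vt not in out', continue
      | some (h, t) =>
        let t := t + 1
        let h := if (PySem.Dict.mk e).get? "judgment" == some "harmful" then h + 1 else h
        out.insert vt (h, t)) out
  out.items.map (fun p => (p.1, p.2.1, p.2.2))

-- ===== PORT B =====
def aggregate_variant_alt (entries : List (List (String × String))) : List (String × Int × Int) :=
  ["base", "base_plus_distractor"].map (fun vt =>
    (vt,
     ((entries.countP (fun e =>
         (PySem.Dict.mk e).get? "variant_type" == some vt
         && (PySem.Dict.mk e).get? "judgment" == some "harmful") : Nat) : Int),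
     ((entries.countP (fun e => (PySem.Dict.mk e).get? "variant_type" == some vt) : Nat) : Int)))

-- ===== PRECONDITION & SPEC =====
def Spec_aggregate_variant (entries : List (List (String × String))) (out : List (String × Int × Int)) : Prop := out = aggregate_variant_alt entries
instance (entries : List (List (String × String))) (out : List (String × Int × Int)) : Decidable (Spec_aggregate_variant entries out) := by unfold Spec_aggregate_variant; infer_instance

-- ===== CLAIM (what is proved, stated in full; the proofs are below) =====
def Claim_equal_aggregate_variant : Prop := ∀ (entries : List (List (String × String))), Dom_aggregate_variant entries → Spec_aggregate_variant entries (aggregate_variant entries)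

-- ===== LEMMAS AND PROOFS =====

-- the loop body of A's port, named for the invariant proof
def pvStepA (out : PySem.Dict String (Int × Int)) (e : List (String × String)) :
    PySem.Dict String (Int × Int) :=
  match (PySem.Dict.mk e).get? "variant_type" with
  | none => out
  | some vt =>
    match out.get? vt with
    | none => out
    | some (h, t) =>
      let t := t + 1
      let h := if (PySem.Dict.mk e).get? "judgment" == some "harmful" then h + 1 else h
      out.insert vt (h, t)

def pvIsVt (vt : String) (e : List (String × String)) : Bool :=
  (PySem.Dict.mk e).get? "variant_type" == some vt

def pvIsVtH (vt : String) (e : List (String × String)) : Bool :=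
  pvIsVt vt e && ((PySem.Dict.mk e).get? "judgment" == some "harmful")

lemma pvLoopInv (es : List (List (String × String))) (h1 t1 h2 t2 : Int) :
    es.foldl pvStepA (PySem.Dict.mk [("base", (h1, t1)), ("base_plus_distractor", (h2, t2))])
    = PySem.Dict.mk
        [("base", (h1 + (es.countP (pvIsVtH "base") : Int), t1 + (es.countP (pvIsVt "base") : Int))),
         ("base_plus_distractor",
          (h2 + (es.countP (pvIsVtH "base_plus_distractor") : Int),
           t2 + (es.countP (pvIsVt "base_plus_distractor") : Int)))] := by
  induction es generalizing h1 t1 h2 t2 with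
  | nil => simp [List.countP]
  | cons e es ih =>
    simp only [List.foldl_cons, List.countP_cons]
    rcases hv : (PySem.Dict.mk e).get? "variant_type" with _ | vt
    · have hA : pvIsVt "base" e = false := by simp [pvIsVt, hv]
      have hB : pvIsVt "base_plus_distractor" e = false := by simp [pvIsVt, hv]
      simp [pvStepA, hv, ih, hA, hB, pvIsVtH]
    · by_cases hb : vt = "base"
      · subst hb
        have hA : pvIsVt "base" e = true := by simp [pvIsVt, hv]
        have hB : pvIsVt "base_plus_distractor" e = false := by
          simp [pvIsVt, hv]
        rcases hj : ((PySem.Dict.mk e).get? "judgment" == some "harmful") with _ | _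
        · have hAH : pvIsVtH "base" e = false := by simp [pvIsVtH, hA, hj]
          have hBH : pvIsVtH "base_plus_distractor" e = false := by simp [pvIsVtH, hB]
          simp only [pvStepA, hv, hj, Bool.false_eq_true, if_false]
          rw [show (PySem.Dict.mk [("base", (h1, t1)), ("base_plus_distractor", (h2, t2))]).get?
                "base" = some (h1, t1) by rfl]
          simp only []
          rw [show (PySem.Dict.mk [("base", (h1, t1)), ("base_plus_distractor", (h2, t2))]).insert
                "base" (h1, t1 + 1)
              = PySem.Dict.mk [("base", (h1, t1 + 1)), ("base_plus_distractor", (h2, t2))] by rfl]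
          rw [ih]
          simp [hA, hB, hAH, hBH]
          ring_nf
        · have hAH : pvIsVtH "base" e = true := by simp [pvIsVtH, hA, hj]
          have hBH : pvIsVtH "base_plus_distractor" e = false := by simp [pvIsVtH, hB]
          simp only [pvStepA, hv, hj, if_true]
          rw [show (PySem.Dict.mk [("base", (h1, t1)), ("base_plus_distractor", (h2, t2))]).get?
                "base" = some (h1, t1) by rfl]
          simp only []
          rw [show (PySem.Dict.mk [("base", (h1, t1)), ("base_plus_distractor", (h2, t2))]).insert
                "base" (h1 + 1, t1 + 1)
              = PySem.Dict.mk [("base", (h1 + 1, t1 + 1)), ("base_plus_distractor", (h2, t2))] by rfl]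
          rw [ih]
          simp [hA, hB, hAH, hBH]
          ring_nf
          trivial
      · by_cases hd : vt = "base_plus_distractor"
        · subst hd
          have hA : pvIsVt "base" e = false := by simp [pvIsVt, hv]
          have hB : pvIsVt "base_plus_distractor" e = true := by simp [pvIsVt, hv]
          rcases hj : ((PySem.Dict.mk e).get? "judgment" == some "harmful") with _ | _
          · have hAH : pvIsVtH "base" e = false := by simp [pvIsVtH, hA]
            have hBH : pvIsVtH "base_plus_distractor" e = false := by simp [pvIsVtH, hB, hj]
            simp only [pvStepA, hv, hj, Bool.false_eq_true, if_false]
            rw [show (PySem.Dict.mk [("base", (h1, t1)), ("base_plus_distractor", (h2, t2))]).get?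
                  "base_plus_distractor" = some (h2, t2) by rfl]
            simp only []
            rw [show (PySem.Dict.mk [("base", (h1, t1)), ("base_plus_distractor", (h2, t2))]).insert
                  "base_plus_distractor" (h2, t2 + 1)
                = PySem.Dict.mk [("base", (h1, t1)), ("base_plus_distractor", (h2, t2 + 1))] by rfl]
            rw [ih]
            simp [hA, hB, hAH, hBH]
            ring_nf
          · have hAH : pvIsVtH "base" e = false := by simp [pvIsVtH, hA]
            have hBH : pvIsVtH "base_plus_distractor" e = true := by simp [pvIsVtH, hB, hj]
            simp only [pvStepA, hv, hj, if_true]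
            rw [show (PySem.Dict.mk [("base", (h1, t1)), ("base_plus_distractor", (h2, t2))]).get?
                  "base_plus_distractor" = some (h2, t2) by rfl]
            simp only []
            rw [show (PySem.Dict.mk [("base", (h1, t1)), ("base_plus_distractor", (h2, t2))]).insert
                  "base_plus_distractor" (h2 + 1, t2 + 1)
                = PySem.Dict.mk [("base", (h1, t1)), ("base_plus_distractor", (h2 + 1, t2 + 1))] by rfl]
            rw [ih]
            simp [hA, hB, hAH, hBH]
            ring_nf
            trivial
        · have hA : pvIsVt "base" e = false := by simp [pvIsVt, hv, hb]
          have hB : pvIsVt "base_plus_distractor" e = false := by simp [pvIsVt, hv, hd]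
          have hget : (PySem.Dict.mk [("base", (h1, t1)), ("base_plus_distractor", (h2, t2))]).get?
              vt = none := by
            simp only [PySem.Dict.get?_mk_cons]
            rw [if_neg (by simp [beq_iff_eq]; exact fun h => hb h.symm),
                if_neg (by simp [beq_iff_eq]; exact fun h => hd h.symm)]
            rfl
          simp [pvStepA, hv, hget, ih, hA, hB, pvIsVtH]

-- ===== VERDICT (by name: the statement is the Claim_ definition above) =====
theorem aggregate_variant_spec : Claim_equal_aggregate_variant := by
  intro entries _
  unfold Spec_aggregate_variant
  show (List.foldl pvStepA
      (PySem.Dict.ofList [("base", (0, 0)), ("base_plus_distractor", (0, 0))]) entries).items.map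
      (fun p => (p.1, p.2.1, p.2.2)) = aggregate_variant_alt entries
  rw [show (PySem.Dict.ofList [("base", ((0 : Int), (0 : Int))), ("base_plus_distractor", (0, 0))])
      = PySem.Dict.mk [("base", (0, 0)), ("base_plus_distractor", (0, 0))] from rfl]
  rw [pvLoopInv]
  have e1 : ∀ vt : String, pvIsVtH vt = fun e =>
      ((PySem.Dict.mk e).get? "variant_type" == some vt
        && (PySem.Dict.mk e).get? "judgment" == some "harmful") := fun _ => rfl
  have e2 : ∀ vt : String, pvIsVt vt = fun e =>
      ((PySem.Dict.mk e).get? "variant_type" == some vt) := fun _ => rfl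
  simp [aggregate_variant_alt, e1, e2]
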